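-- pv_equiv track=rewrite | github.com/songtao0416/CBIMPDFTest | pdf解析代码_贝贝/test_pdfplumber.py | filter_split_line
-- ===== SOURCE A (Python) =====
-- def filter_split_line(box, split_lines, threshold_dist=500):
-- 	"""
-- 	 过滤掉切分太细的分割线，是为了解决文本块最后一列全是表格时被划分得太细的问题
-- 	:param box: 要切分的文本块
-- 	:param split_lines: 切割线
-- 	:param threshold_dist: 分割线的距离筛选阈值
-- 	:return filtered_split_lines: 筛选后的切割线
-- 	"""
-- 	box_v_lines = [box[0]] + split_lines + [box[2]]
-- 	if len(box_v_lines) > 3:  # 检索出多条分割线时，复查是否有把表格分割太细的情况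
-- 		del_list = []
-- 		del_list_tmp = []
-- 		for start in range(len(box_v_lines)-1):
-- 			if (box_v_lines[start+1] - box_v_lines[start]) < threshold_dist:
-- 				del_list_tmp.append(box_v_lines[start])
-- 			else:
-- 				del_list += del_list_tmp[1:]
-- 				del_list_tmp = []
-- 		del_list += del_list_tmp[1:]
-- 		filtered_split_lines = [line for line in box_v_lines if (line not in del_list)]
-- 		return filtered_split_lines
-- 	else:
-- 		return box_v_lines
-- ===== SOURCE B (Python) =====
-- def filter_split_line(box, split_lines, threshold_dist=500):
--     """Simpler re-implementation: a stateless local predicate over consecutive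
--     triples replaces the buffer-and-flush run grouping; a value is deleted iff
--     both of its adjacent gaps are below the threshold."""
--     box_v_lines = [box[0]] + split_lines + [box[2]]
--     if len(box_v_lines) <= 3:
--         return box_v_lines
--     dels = {b for a, b, c in zip(box_v_lines, box_v_lines[1:], box_v_lines[2:])
--             if c - b < threshold_dist and b - a < threshold_dist}
--     return [line for line in box_v_lines if line not in dels]
-- ===== Notes on version B (the rewrite author's own statement) =====
-- stated objective: simpler
-- what changed: The stateful buffer-and-flush run-grouping loop (del_list_tmp collected per run, flushed minus its first element on each wide gap and once after the loop) is replaced by a stateless set comprehension over consecutive triples: a line is deleted iff both adjacent gaps are below the threshold; the value-based filter is kept but tests membership in a set.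
import Mathlib
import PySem

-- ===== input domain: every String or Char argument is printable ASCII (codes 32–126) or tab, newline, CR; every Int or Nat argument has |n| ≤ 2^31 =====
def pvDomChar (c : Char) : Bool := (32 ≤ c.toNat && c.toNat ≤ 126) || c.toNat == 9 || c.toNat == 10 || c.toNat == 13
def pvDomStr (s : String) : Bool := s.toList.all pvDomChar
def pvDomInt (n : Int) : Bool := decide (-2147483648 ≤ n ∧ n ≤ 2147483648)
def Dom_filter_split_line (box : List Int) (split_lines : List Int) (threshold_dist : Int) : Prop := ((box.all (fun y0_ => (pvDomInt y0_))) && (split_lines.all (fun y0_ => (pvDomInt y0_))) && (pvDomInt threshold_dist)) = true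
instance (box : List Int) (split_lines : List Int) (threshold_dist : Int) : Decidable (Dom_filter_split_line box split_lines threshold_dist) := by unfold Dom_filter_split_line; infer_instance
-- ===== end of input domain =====

-- B replaces A's stateful buffer-and-flush run grouping by a stateless per-triple
-- predicate (a line is deleted iff both adjacent gaps are below the threshold);
-- objective: simpler.

-- ===== PORT A =====
def filter_split_line (box : List Int) (split_lines : List Int) (threshold_dist : Int) : List Int :=
  match PySem.List.pyGet? box 0 with
  | none => []  -- Python raises IndexError here (box empty); excluded by Pre_
  | some b0 =>
  match PySem.List.pyGet? box 2 with
  | none => []  -- Python raises IndexError here (box shorter than 3); excluded by Pre_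
  | some b2 =>
    let box_v_lines := [b0] ++ split_lines ++ [b2]
    if 3 < (box_v_lines.length : Int) then
      let st := (PySem.List.pyRange 0 ((box_v_lines.length : Int) - 1) 1).foldl
        (fun (acc : List Int × List Int) start =>
          if PySem.List.pyGetD box_v_lines (start + 1) 0 - PySem.List.pyGetD box_v_lines start 0 < threshold_dist then
            (acc.1, acc.2 ++ [PySem.List.pyGetD box_v_lines start 0])
          else
            (acc.1 ++ acc.2.drop 1, ([] : List Int)))
        ([], [])
      let del_list := st.1 ++ st.2.drop 1
      box_v_lines.filter (fun line => !(del_list.contains line))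
    else box_v_lines

-- ===== PORT B =====
def filter_split_line_alt (box : List Int) (split_lines : List Int) (threshold_dist : Int) : List Int :=
  match PySem.List.pyGet? box 0, PySem.List.pyGet? box 2 with
  | some b0, some b2 =>
    let box_v_lines := [b0] ++ split_lines ++ [b2]
    if (box_v_lines.length : Int) ≤ 3 then box_v_lines
    else
      let trips := (box_v_lines.zip (PySem.List.slice box_v_lines (some 1) none)).zip
                     (PySem.List.slice box_v_lines (some 2) none)
      let dels : PySem.Set Int := PySem.Set.ofList
        ((trips.filter (fun p =>
            decide (p.2 - p.1.2 < threshold_dist) && decide (p.1.2 - p.1.1 < threshold_dist))).map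
          (fun p => p.1.2))
      box_v_lines.filter (fun line => !(PySem.Set.contains dels line))
  | _, _ => []

-- ===== PRECONDITION & SPEC =====
-- A evaluates box[0] and box[2]: it raises IndexError exactly when box has fewer
-- than 3 elements; Pre_ excludes only those inputs.
def Pre_filter_split_line (box : List Int) (split_lines : List Int) (threshold_dist : Int) : Prop :=
  3 ≤ box.length
instance (box : List Int) (split_lines : List Int) (threshold_dist : Int) : Decidable (Pre_filter_split_line box split_lines threshold_dist) := by unfold Pre_filter_split_line; infer_instance
def pvWitness_filter_split_line : List Int × List Int × Int := ([0, 5, 1000], [100, 150, 700], 200)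

def Spec_filter_split_line (box : List Int) (split_lines : List Int) (threshold_dist : Int) (out : List Int) : Prop := out = filter_split_line_alt box split_lines threshold_dist
instance (box : List Int) (split_lines : List Int) (threshold_dist : Int) (out : List Int) : Decidable (Spec_filter_split_line box split_lines threshold_dist out) := by unfold Spec_filter_split_line; infer_instance

-- ===== CLAIM (what is proved, stated in full; the proofs are below) =====
def Claim_equal_filter_split_line : Prop := ∀ (box : List Int) (split_lines : List Int) (threshold_dist : Int), Dom_filter_split_line box split_lines threshold_dist → Pre_filter_split_line box split_lines threshold_dist → Spec_filter_split_line box split_lines threshold_dist (filter_split_line box split_lines threshold_dist)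

-- ===== LEMMAS AND PROOFS =====
def pvStep (t : Int) (acc : List Int × List Int) (p : Int × Int) : List Int × List Int :=
  if p.2 - p.1 < t then (acc.1, acc.2 ++ [p.1]) else (acc.1 ++ acc.2.drop 1, ([] : List Int))

def pvSpecAux (t : Int) : Bool → List (Int × Int) → List Int
  | _, [] => []
  | prev, p :: ps =>
    if p.2 - p.1 < t then (if prev then [p.1] else []) ++ pvSpecAux t true ps
    else pvSpecAux t false ps

def pvTrips : List Int → List ((Int × Int) × Int)
  | x :: y :: z :: r => ((x, y), z) :: pvTrips (y :: z :: r)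
  | _ => []
termination_by v => v.length

def pvTrip (t : Int) : List Int → List Int
  | x :: y :: z :: r => (if z - y < t ∧ y - x < t then [y] else []) ++ pvTrip t (y :: z :: r)
  | _ => []
termination_by v => v.length

theorem pvStep_all (t : Int) : ∀ (ps : List (Int × Int)) (del tmp : List Int),
    (ps.foldl (pvStep t) (del, tmp)).1 ++ (ps.foldl (pvStep t) (del, tmp)).2.drop 1
      = del ++ tmp.drop 1 ++ (if tmp.isEmpty then pvSpecAux t false ps else pvSpecAux t true ps) := by
  intro ps
  induction ps with
  | nil => intro del tmp; simp [pvSpecAux]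
  | cons p ps ih =>
    intro del tmp
    rw [List.foldl_cons]
    by_cases h : p.2 - p.1 < t
    · rw [show pvStep t (del, tmp) p = (del, tmp ++ [p.1]) from by simp [pvStep, h]]
      rw [ih]
      cases tmp with
      | nil => simp [pvSpecAux, h]
      | cons a tmp' => simp [pvSpecAux, h]
    · rw [show pvStep t (del, tmp) p = (del ++ tmp.drop 1, ([] : List Int)) from by simp [pvStep, h]]
      rw [ih]
      simp [pvSpecAux, h]

theorem pvSpecAux_cons (t : Int) (prev : Bool) (p : Int × Int) (ps : List (Int × Int)) :
    pvSpecAux t prev (p :: ps)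
      = if p.2 - p.1 < t then (if prev then [p.1] else []) ++ pvSpecAux t true ps
        else pvSpecAux t false ps := rfl

theorem pvTrip_cons3 (t : Int) (x y z : Int) (r : List Int) :
    pvTrip t (x :: y :: z :: r)
      = (if z - y < t ∧ y - x < t then [y] else []) ++ pvTrip t (y :: z :: r) := by
  rw [pvTrip]

theorem pvSpecAux_pairs (t : Int) : ∀ (v : List Int) (x : Int),
    pvSpecAux t false ((x :: v).zip v) = pvTrip t (x :: v) ∧
    pvSpecAux t true ((x :: v).zip v)
      = (match v with | y :: _ => if y - x < t then [x] else [] | [] => []) ++ pvTrip t (x :: v) := by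
  intro v
  induction v with
  | nil => intro x; constructor <;> simp [pvSpecAux, pvTrip]
  | cons y r ih =>
    intro x
    have hy := ih y
    have hzip : (x :: y :: r).zip (y :: r) = (x, y) :: (y :: r).zip r := rfl
    rw [hzip]
    constructor
    · rw [pvSpecAux_cons]
      by_cases h : y - x < t
      · rw [if_pos h, hy.2]
        cases r with
        | nil => simp [pvTrip]
        | cons z r' => by_cases hz : z - y < t <;> simp [pvTrip_cons3, h, hz]
      · rw [if_neg h, hy.1]
        cases r with
        | nil => simp [pvTrip]
        | cons z r' => simp [pvTrip_cons3, h]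
    · rw [pvSpecAux_cons]
      by_cases h : y - x < t
      · rw [if_pos h, hy.2]
        cases r with
        | nil => simp [pvTrip, h]
        | cons z r' => by_cases hz : z - y < t <;> simp [pvTrip_cons3, h, hz]
      · rw [if_neg h, hy.1]
        cases r with
        | nil => simp [pvTrip, h]
        | cons z r' => simp [pvTrip_cons3, h]

theorem pvTrips_eq : ∀ v : List Int, (v.zip (v.drop 1)).zip (v.drop 2) = pvTrips v
  | [] => by simp [pvTrips]
  | [x] => by simp [pvTrips]
  | [x, y] => by simp [pvTrips]
  | x :: y :: z :: r => by
    have ih := pvTrips_eq (y :: z :: r)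
    simp only [List.drop_succ_cons, List.drop_zero, List.zip_cons_cons, pvTrips] at ih ⊢
    rw [← ih]
termination_by v => v.length

theorem pvTrip_trips (t : Int) : ∀ v : List Int,
    ((pvTrips v).filter (fun p =>
        decide (p.2 - p.1.2 < t) && decide (p.1.2 - p.1.1 < t))).map (fun p => p.1.2)
      = pvTrip t v
  | [] => by simp [pvTrips, pvTrip]
  | [x] => by simp [pvTrips, pvTrip]
  | [x, y] => by simp [pvTrips, pvTrip]
  | x :: y :: z :: r => by
    have ih := pvTrip_trips t (y :: z :: r)
    by_cases h1 : z - y < t <;> by_cases h2 : y - x < t <;>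
      simp [pvTrips, pvTrip_cons3, h1, h2, ih]
termination_by v => v.length

theorem pvRange_map_pairs (v : List Int) (hv : 1 ≤ v.length) :
    (PySem.List.pyRange 0 ((v.length : Int) - 1) 1).map
        (fun j => (PySem.List.pyGetD v j 0, PySem.List.pyGetD v (j + 1) 0))
      = v.zip (v.drop 1) := by
  have hcast : ((v.length : Int) - 1) = ((v.length - 1 : Nat) : Int) := by omega
  rw [hcast, PySem.List.pyRange_zero_natCast]
  apply List.ext_getElem
  · simp [List.length_zip]
    try omega
  · intro k h1 h2
    have hk : k < v.length - 1 := by simpa using h1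
    have hgd1 : PySem.List.pyGetD v (k : Int) 0 = v[k] := by
      rw [PySem.List.pyGetD_natCast]; exact List.getD_eq_getElem v 0 (by omega)
    have hgd2 : PySem.List.pyGetD v ((k : Int) + 1) 0 = v[k + 1] := by
      have h' : ((k : Int) + 1) = ((k + 1 : Nat) : Int) := by omega
      rw [h', PySem.List.pyGetD_natCast]; exact List.getD_eq_getElem v 0 (by omega)
    simp [List.getElem_zip, hgd1, hgd2]

theorem pvA_del (t : Int) (v : List Int) (hv : 1 ≤ v.length) :
    ((PySem.List.pyRange 0 ((v.length : Int) - 1) 1).foldl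
        (fun (acc : List Int × List Int) start =>
          if PySem.List.pyGetD v (start + 1) 0 - PySem.List.pyGetD v start 0 < t then
            (acc.1, acc.2 ++ [PySem.List.pyGetD v start 0])
          else (acc.1 ++ acc.2.drop 1, ([] : List Int))) ([], [])).1 ++
      (((PySem.List.pyRange 0 ((v.length : Int) - 1) 1).foldl
        (fun (acc : List Int × List Int) start =>
          if PySem.List.pyGetD v (start + 1) 0 - PySem.List.pyGetD v start 0 < t then
            (acc.1, acc.2 ++ [PySem.List.pyGetD v start 0])
          else (acc.1 ++ acc.2.drop 1, ([] : List Int))) ([], [])).2).drop 1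
      = pvTrip t v := by
  have hfold : ∀ (init : List Int × List Int),
      ((PySem.List.pyRange 0 ((v.length : Int) - 1) 1).map
        (fun j => (PySem.List.pyGetD v j 0, PySem.List.pyGetD v (j + 1) 0))).foldl (pvStep t) init
      = (PySem.List.pyRange 0 ((v.length : Int) - 1) 1).foldl
        (fun (acc : List Int × List Int) start =>
          if PySem.List.pyGetD v (start + 1) 0 - PySem.List.pyGetD v start 0 < t then
            (acc.1, acc.2 ++ [PySem.List.pyGetD v start 0])
          else (acc.1 ++ acc.2.drop 1, ([] : List Int))) init := by
    intro init; rw [List.foldl_map]; rfl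
  rw [← hfold, pvRange_map_pairs v hv, pvStep_all]
  match v, hv with
  | x :: v', _ =>
    simpa using (pvSpecAux_pairs t v' x).1

theorem pvB_del (t : Int) (v : List Int) (x : Int) :
    (PySem.Set.contains (PySem.Set.ofList
      (((( v.zip (PySem.List.slice v (some 1) none)).zip (PySem.List.slice v (some 2) none)).filter
          (fun p => decide (p.2 - p.1.2 < t) && decide (p.1.2 - p.1.1 < t))).map (fun p => p.1.2))) x)
      = (pvTrip t v).contains x := by
  rw [show PySem.List.slice v (some 1) none = v.drop 1 from by simp [pysem],
      show PySem.List.slice v (some 2) none = v.drop 2 from by simp [pysem],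
      pvTrips_eq, pvTrip_trips]
  simp [PySem.Set.contains, PySem.Set.mem_ofList]

theorem pvMain (box : List Int) (split_lines : List Int) (t : Int) (hpre : 3 ≤ box.length) :
    filter_split_line box split_lines t = filter_split_line_alt box split_lines t := by
  unfold filter_split_line filter_split_line_alt
  obtain ⟨b0, b1, b2, rest, rfl⟩ : ∃ b0 b1 b2 rest, box = b0 :: b1 :: b2 :: rest := by
    match box, hpre with
    | b0 :: b1 :: b2 :: rest, _ => exact ⟨b0, b1, b2, rest, rfl⟩
  have h0 : PySem.List.pyGet? (b0 :: b1 :: b2 :: rest) (0 : Int) = some b0 := by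
    simp [PySem.List.pyGet?, PySem.List.pyIdx?,
      show (0 : Int) ≤ (rest.length : Int) + 1 + 1 from by omega]
  have h2 : PySem.List.pyGet? (b0 :: b1 :: b2 :: rest) (2 : Int) = some b2 := by
    simp [PySem.List.pyGet?, PySem.List.pyIdx?,
      show (2 : Int) ≤ (rest.length : Int) + 1 + 1 from by omega]
  simp only [h0, h2]
  by_cases hb : 3 < (([b0] ++ split_lines ++ [b2]).length : Int)
  · rw [if_pos hb, if_neg (by omega)]
    have hlen : 1 ≤ ([b0] ++ split_lines ++ [b2]).length := by simp
    rw [pvA_del t ([b0] ++ split_lines ++ [b2]) hlen]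
    apply List.filter_congr
    intro x _
    rw [pvB_del t ([b0] ++ split_lines ++ [b2]) x]
  · rw [if_neg hb, if_pos (by omega)]

-- ===== VERDICT (by name: the statement is the Claim_ definition above) =====
theorem filter_split_line_spec : Claim_equal_filter_split_line := by
  intro box split_lines threshold_dist _hdom hpre
  unfold Spec_filter_split_line
  exact pvMain box split_lines threshold_dist hpre
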